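-- pv_equiv track=rewrite | github.com/54younger/IIS_Project | structured_interview.py | pre_filter_user_answer
-- ===== SOURCE A (Python) =====
-- def pre_filter_user_answer(user_answer):
--     """
--     Pre-filter user input to block jailbreak attempts and prompt injection.
--     Returns: (is_safe: bool, warning_message: str or None)
--     """
--     if not user_answer or user_answer == "No response":
--         return True, None
--
--     # Detect jailbreak/prompt injection attempts
--     banned_phrases = [
--         "ignore previous", "ignore all", "disregard",
--         "system prompt", "override", "bypass",
--         "act as", "pretend to be", "you are now",
--         "forget everything", "new instructions",
--         "developer mode", "admin mode", "jailbreak"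
--     ]
--
--     lower_answer = user_answer.lower()
--     for phrase in banned_phrases:
--         if phrase in lower_answer:
--             return False, "I'm here only to help with interview practice. Let's try again."
--
--     return True, None
-- ===== SOURCE B (Python) =====
-- BANNED_PHRASES = (
--     "ignore previous", "ignore all", "disregard",
--     "system prompt", "override", "bypass",
--     "act as", "pretend to be", "you are now",
--     "forget everything", "new instructions",
--     "developer mode", "admin mode", "jailbreak",
-- )
--
-- WARNING = "I'm here only to help with interview practice. Let's try again."
--
--
-- def pre_filter_user_answer(user_answer):
--     """Position-scan variant: walk the lowered text once and test, at each
--     position, whether a banned phrase starts there."""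
--     if user_answer and user_answer != "No response":
--         text = user_answer.lower()
--         for i in range(len(text)):
--             tail = text[i:]
--             for phrase in BANNED_PHRASES:
--                 if tail.startswith(phrase):
--                     return False, WARNING
--     return True, None
-- ===== Notes on version B (the rewrite author's own statement) =====
-- stated objective: alternative
-- what changed: A loops over the 14 banned phrases doing one full substring search over the text per phrase; B makes a single outer scan over the text positions and at each position checks whether some phrase starts there with startswith, inverting the loop nesting and the matching primitive; B trades speed for this (slicing each tail makes it quadratic in Python).
import Mathlib
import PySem

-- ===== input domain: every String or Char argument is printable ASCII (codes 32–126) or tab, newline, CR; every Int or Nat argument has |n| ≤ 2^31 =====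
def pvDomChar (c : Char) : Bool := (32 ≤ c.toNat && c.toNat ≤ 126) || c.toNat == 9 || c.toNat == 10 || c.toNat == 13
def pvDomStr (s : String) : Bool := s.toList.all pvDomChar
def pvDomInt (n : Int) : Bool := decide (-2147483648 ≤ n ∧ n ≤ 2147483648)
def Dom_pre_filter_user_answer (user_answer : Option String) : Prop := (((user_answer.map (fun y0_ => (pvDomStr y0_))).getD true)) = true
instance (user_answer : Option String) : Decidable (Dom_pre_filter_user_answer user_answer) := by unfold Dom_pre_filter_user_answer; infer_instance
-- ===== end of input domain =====

-- B inverts A's loop nesting: a single scan over text positions checking startswith per position,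
-- instead of one substring search per banned phrase (objective: alternative; same return values).


-- ===== PORT A =====
def pvBanned : List String :=
  ["ignore previous", "ignore all", "disregard",
   "system prompt", "override", "bypass",
   "act as", "pretend to be", "you are now",
   "forget everything", "new instructions",
   "developer mode", "admin mode", "jailbreak"]

def pvWarning : String := "I'm here only to help with interview practice. Let's try again."

-- the 'for phrase in banned_phrases' loop of A
def pvLoopA : List String → String → Bool × Option String
  | [], _ => (true, none)
  | p :: rest, lowerAns =>
    if PySem.Str.isIn p lowerAns then (false, some pvWarning) else pvLoopA rest lowerAns

def pre_filter_user_answer (user_answer : Option String) : Bool × Option String :=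
  match user_answer with
  | none => (true, none)
  | some s =>
    if s = "" ∨ s = "No response" then (true, none)
    else pvLoopA pvBanned (PySem.Str.lower s)

-- ===== PORT B =====
def pvBannedB : List (List Char) := pvBanned.map String.toList

-- the 'for i in range(len(text))' loop of B: walk the suffixes, test startswith at each
def pvScanB : List Char → Bool
  | [] => false
  | c :: rest =>
    if pvBannedB.any (fun p => PySem.Chars.startswith (c :: rest) p) then true
    else pvScanB rest

def pre_filter_user_answer_alt (user_answer : Option String) : Bool × Option String :=
  match user_answer with
  | none => (true, none)
  | some s =>
    if s = "" ∨ s = "No response" then (true, none)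
    else if pvScanB (PySem.Str.lower s).toList then (false, some pvWarning)
    else (true, none)

-- ===== PRECONDITION & SPEC =====
def Spec_pre_filter_user_answer (user_answer : Option String) (out : Bool × Option String) : Prop := out = pre_filter_user_answer_alt user_answer
instance (user_answer : Option String) (out : Bool × Option String) : Decidable (Spec_pre_filter_user_answer user_answer out) := by unfold Spec_pre_filter_user_answer; infer_instance

-- ===== CLAIM (what is proved, stated in full; the proofs are below) =====
def Claim_equal_pre_filter_user_answer : Prop := ∀ (user_answer : Option String), Dom_pre_filter_user_answer user_answer → Spec_pre_filter_user_answer user_answer (pre_filter_user_answer user_answer)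

-- ===== LEMMAS AND PROOFS =====
-- A's loop returns (false, warning) iff some phrase is a substring of the lowered answer.
theorem pvLoopA_eq (ps : List String) (lowerAns : String) :
    pvLoopA ps lowerAns =
      if ps.any (fun p => PySem.Str.isIn p lowerAns) then (false, some pvWarning)
      else (true, none) := by
  induction ps with
  | nil => simp [pvLoopA]
  | cons p rest ih =>
    simp only [pvLoopA, List.any_cons, Bool.or_eq_true, ih]
    by_cases h : PySem.Str.isIn p lowerAns = true
    · rw [if_pos h, if_pos (Or.inl h)]
    · rw [if_neg h]
      by_cases hr : (rest.any fun q => PySem.Str.isIn q lowerAns) = true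
      · rw [if_pos hr, if_pos (Or.inr hr)]
      · rw [if_neg hr, if_neg (fun hc => hc.elim h hr)]

-- B's position scan succeeds iff some banned phrase is an infix of the text.
theorem pvScanB_iff (l : List Char) :
    pvScanB l = true ↔ ∃ p ∈ pvBannedB, p <:+: l := by
  induction l with
  | nil =>
    simp only [pvScanB, Bool.false_eq_true, false_iff]
    decide
  | cons c rest ih =>
    have hunf : pvScanB (c :: rest)
        = (pvBannedB.any (fun p => PySem.Chars.startswith (c :: rest) p) || pvScanB rest) := by
      simp only [pvScanB]
      cases h : pvBannedB.any (fun p => PySem.Chars.startswith (c :: rest) p) <;> simp [*]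
    rw [hunf, Bool.or_eq_true, ih, List.any_eq_true]
    constructor
    · rintro (⟨p, hp, hsw⟩ | ⟨p, hp, hinf⟩)
      · exact ⟨p, hp, ((PySem.Chars.startswith_iff _ _).mp hsw).isInfix⟩
      · exact ⟨p, hp, hinf.trans ((List.suffix_cons c rest).isInfix)⟩
    · rintro ⟨p, hp, hinf⟩
      rcases List.infix_cons_iff.mp hinf with hpre | hinf'
      · exact Or.inl ⟨p, hp, (PySem.Chars.startswith_iff _ _).mpr hpre⟩
      · exact Or.inr ⟨p, hp, hinf'⟩

-- the two search conditions coincide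
theorem pvCond_eq (lowerAns : String) :
    (pvBanned.any fun p => PySem.Str.isIn p lowerAns) = pvScanB lowerAns.toList := by
  rw [Bool.eq_iff_iff, pvScanB_iff, List.any_eq_true]
  constructor
  · rintro ⟨p, hp, hin⟩
    exact ⟨p.toList, List.mem_map.mpr ⟨p, hp, rfl⟩, (PySem.Str.isIn_iff_infix _ _).mp hin⟩
  · rintro ⟨q, hq, hinf⟩
    rcases List.mem_map.mp hq with ⟨p, hp, rfl⟩
    exact ⟨p, hp, (PySem.Str.isIn_iff_infix _ _).mpr hinf⟩

-- ===== VERDICT (by name: the statement is the Claim_ definition above) =====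
theorem pre_filter_user_answer_spec : Claim_equal_pre_filter_user_answer := by
  intro user_answer _
  unfold Spec_pre_filter_user_answer pre_filter_user_answer pre_filter_user_answer_alt
  cases user_answer with
  | none => rfl
  | some s =>
    by_cases hg : s = "" ∨ s = "No response"
    · simp [hg]
    · simp only [hg, if_false]
      rw [pvLoopA_eq, pvCond_eq]
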